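-- pv_equiv track=rewrite | github.com/samhithch-prog/PyStreamlineAI | src/service/resume_builder_service.py | _normalize_multiline_text
-- ===== SOURCE A (Python) =====
-- def _normalize_multiline_text(value: str) -> str:
--     raw = str(value or "").replace("\r\n", "\n").replace("\r", "\n")
--     cleaned_lines = [line.rstrip() for line in raw.split("\n")]
--     normalized: list[str] = []
--     previous_blank = False
--     for line in cleaned_lines:
--         if line.strip():
--             normalized.append(line.strip())
--             previous_blank = False
--         else:
--             if not previous_blank:
--                 normalized.append("")
--             previous_blank = True
--     return "\n".join(normalized).strip()
-- ===== SOURCE B (Python) =====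
-- def _normalize_multiline_text(value: str) -> str:
--     text = str(value or "").replace("\r\n", "\n").replace("\r", "\n")
--     lines = [line.strip() for line in text.split("\n")]
--     kept = [cur for cur, nxt in zip(lines, lines[1:] + [""]) if cur or nxt]
--     return "\n".join(kept).strip()
-- ===== Notes on version B (the rewrite author's own statement) =====
-- stated objective: simpler
-- what changed: A's stateful loop with a previous_blank flag (which keeps the first blank line of each run) is replaced by a stateless comprehension that zips each stripped line with its successor and keeps a blank line only when the next line is non-blank (the last of each run); the two choices coincide after the final strip.
import Mathlib
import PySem

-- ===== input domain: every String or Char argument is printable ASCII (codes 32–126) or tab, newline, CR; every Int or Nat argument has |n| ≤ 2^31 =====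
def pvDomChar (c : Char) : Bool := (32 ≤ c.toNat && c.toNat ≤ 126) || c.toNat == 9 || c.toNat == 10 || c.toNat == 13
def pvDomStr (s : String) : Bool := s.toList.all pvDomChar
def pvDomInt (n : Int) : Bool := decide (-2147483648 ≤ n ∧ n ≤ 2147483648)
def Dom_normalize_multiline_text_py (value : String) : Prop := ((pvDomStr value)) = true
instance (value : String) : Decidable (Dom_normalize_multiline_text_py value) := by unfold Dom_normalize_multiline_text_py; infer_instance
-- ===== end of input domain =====

-- B replaces A's stateful previous_blank loop by a stateless zip-with-successor filter
-- (keep a blank line only when the next line is non-blank); objective: simpler.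

-- ===== PORT A =====
-- loop body: if line.strip(): append(line.strip()); prev=False
--            else: (if not prev: append("")); prev=True
def nmtStep (st : List (List Char) × Bool) (line : List Char) : List (List Char) × Bool :=
  if PySem.Chars.strip line ≠ [] then (st.1 ++ [PySem.Chars.strip line], false)
  else if st.2 then (st.1, true) else (st.1 ++ [[]], true)

def normalize_multiline_text_py (value : String) : String :=
  -- str(value or "") = value for every str argument ("" or "" == "")
  let raw := PySem.Chars.replace (PySem.Chars.replace value.toList ['\r', '\n'] ['\n']) ['\r'] ['\n']
  let cleaned_lines := (PySem.Chars.splitOn raw ['\n']).map PySem.Chars.rstrip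
  let normalized := (cleaned_lines.foldl nmtStep ([], false)).1
  String.ofList (PySem.Chars.strip (PySem.Chars.join ['\n'] normalized))

-- ===== PORT B =====
def normalize_multiline_text_py_alt (value : String) : String :=
  let text := PySem.Chars.replace (PySem.Chars.replace value.toList ['\r', '\n'] ['\n']) ['\r'] ['\n']
  let lines := (PySem.Chars.splitOn text ['\n']).map PySem.Chars.strip
  -- [cur for cur, nxt in zip(lines, lines[1:] + [""]) if cur or nxt]
  let kept := ((lines.zip (lines.tail ++ [[]])).filter
      (fun p => !(p.1.isEmpty && p.2.isEmpty))).map Prod.fst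
  String.ofList (PySem.Chars.strip (PySem.Chars.join ['\n'] kept))

-- ===== PRECONDITION & SPEC =====
def Spec_normalize_multiline_text_py (value : String) (out : String) : Prop := out = normalize_multiline_text_py_alt value
instance (value : String) (out : String) : Decidable (Spec_normalize_multiline_text_py value out) := by unfold Spec_normalize_multiline_text_py; infer_instance

-- ===== CLAIM (what is proved, stated in full; the proofs are below) =====
def Claim_equal_normalize_multiline_text_py : Prop := ∀ (value : String), Dom_normalize_multiline_text_py value → Spec_normalize_multiline_text_py value (normalize_multiline_text_py value)

-- ===== LEMMAS AND PROOFS =====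

-- A's loop keeps the FIRST blank of each blank run (flag b = "previous line was blank").
def collapseRuns : Bool → List (List Char) → List (List Char)
  | _, [] => []
  | b, l :: ls =>
    if l = [] then (if b then collapseRuns true ls else [] :: collapseRuns true ls)
    else l :: collapseRuns false ls

-- B's filter keeps a line iff it is non-blank or its successor is non-blank (last of each run).
def keepR : List (List Char) → List (List Char)
  | [] => []
  | [l] => if l = [] then [] else [l]
  | l :: l' :: ls => (if l = [] ∧ l' = [] then [] else [l]) ++ keepR (l' :: ls)

-- canonical form: leading/trailing blanks gone, each interior blank run a single [].
-- flag true = still skipping leading blanks, false = directly after a non-blank line.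
def canonN : Bool → List (List Char) → List (List Char)
  | _, [] => []
  | b, l :: ls =>
    if l = [] then
      (if b then canonN true ls
       else match canonN true ls with
            | [] => []
            | r => [] :: r)
    else l :: canonN false ls

-- drop trailing empty lists (structurally)
def dTE : List (List Char) → List (List Char)
  | [] => []
  | l :: ls =>
    match dTE ls with
    | [] => if l = [] then [] else [l]
    | r => l :: r

-- drop leading empty lists
def dLE (K : List (List Char)) : List (List Char) := K.dropWhile (fun l => l.isEmpty)

-- every element is lstrip/rstrip-fixed
def FixedL (K : List (List Char)) : Prop :=
  ∀ l ∈ K, PySem.Chars.lstrip l = l ∧ PySem.Chars.rstrip l = l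

theorem rstrip_eq_rdropWhile (x : List Char) :
    PySem.Chars.rstrip x = List.rdropWhile PySem.Chars.isspace x := rfl

theorem rstrip_cons (c : Char) (t : List Char) :
    PySem.Chars.rstrip (c :: t) =
      if PySem.Chars.rstrip t = [] then (if PySem.Chars.isspace c then [] else [c])
      else c :: PySem.Chars.rstrip t := by
  simp only [PySem.Chars.rstrip, List.reverse_cons, List.dropWhile_append]
  by_cases h : List.dropWhile PySem.Chars.isspace t.reverse = []
  · simp [h, List.dropWhile]
    by_cases hc : PySem.Chars.isspace c <;> simp [hc]
  · simp [h, List.isEmpty_iff, List.reverse_eq_nil_iff]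

theorem rstrip_append (x y : List Char) :
    PySem.Chars.rstrip (x ++ y) =
      if PySem.Chars.rstrip y = [] then PySem.Chars.rstrip x else x ++ PySem.Chars.rstrip y := by
  simp only [PySem.Chars.rstrip, List.reverse_append, List.dropWhile_append]
  by_cases h : List.dropWhile PySem.Chars.isspace y.reverse = []
  · simp [h]
  · simp [h, List.isEmpty_iff, List.reverse_eq_nil_iff]

theorem lstrip_idem (x : List Char) :
    PySem.Chars.lstrip (PySem.Chars.lstrip x) = PySem.Chars.lstrip x := by
  simp [PySem.Chars.lstrip, List.dropWhile_idempotent]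

theorem rstrip_idem (x : List Char) :
    PySem.Chars.rstrip (PySem.Chars.rstrip x) = PySem.Chars.rstrip x := by
  simp [rstrip_eq_rdropWhile, List.rdropWhile_idempotent]

theorem lstrip_rstrip (y : List Char) :
    PySem.Chars.lstrip (PySem.Chars.rstrip y) = PySem.Chars.rstrip (PySem.Chars.lstrip y) := by
  induction y with
  | nil => rfl
  | cons c t ih =>
    by_cases hc : PySem.Chars.isspace c
    · rw [rstrip_cons]
      by_cases h : PySem.Chars.rstrip t = []
      · have ht : List.dropWhile PySem.Chars.isspace t = [] := by
          rw [List.dropWhile_eq_nil_iff]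
          rw [rstrip_eq_rdropWhile, List.rdropWhile_eq_nil_iff] at h
          exact h
        rw [h, if_pos rfl, if_pos hc]
        have hl : PySem.Chars.lstrip (c :: t) = [] := by
          simp [PySem.Chars.lstrip, List.dropWhile_cons, hc, ht]
        rw [hl]
        rfl
      · simp only [h, if_false, hc, if_true]
        have : PySem.Chars.lstrip (c :: PySem.Chars.rstrip t) = PySem.Chars.lstrip (PySem.Chars.rstrip t) := by
          simp [PySem.Chars.lstrip, List.dropWhile_cons, hc]
        rw [this, ih]
        have : PySem.Chars.lstrip (c :: t) = PySem.Chars.lstrip t := by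
          simp [PySem.Chars.lstrip, List.dropWhile_cons, hc]
        rw [this]
    · have hl : PySem.Chars.lstrip (c :: t) = c :: t := by
        simp [PySem.Chars.lstrip, List.dropWhile_cons, hc]
      rw [hl, rstrip_cons]
      by_cases h : PySem.Chars.rstrip t = [] <;>
        simp [h, hc, PySem.Chars.lstrip, List.dropWhile_cons]

theorem lstrip_strip (x : List Char) :
    PySem.Chars.lstrip (PySem.Chars.strip x) = PySem.Chars.strip x := by
  simp [PySem.Chars.strip, lstrip_rstrip, lstrip_idem]

theorem rstrip_strip (x : List Char) :
    PySem.Chars.rstrip (PySem.Chars.strip x) = PySem.Chars.strip x := by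
  simp [PySem.Chars.strip, rstrip_idem]

theorem strip_rstrip (x : List Char) :
    PySem.Chars.strip (PySem.Chars.rstrip x) = PySem.Chars.strip x := by
  simp [PySem.Chars.strip, lstrip_rstrip, rstrip_idem]

theorem lstrip_append_fixed (x r : List Char) (h : PySem.Chars.lstrip x = x) (hx : x ≠ []) :
    PySem.Chars.lstrip (x ++ r) = x ++ r := by
  simp only [PySem.Chars.lstrip] at *
  rw [List.dropWhile_append, h]
  simp [List.isEmpty_iff, hx]

theorem dTE_cons (l : List Char) (ls : List (List Char)) :
    dTE (l :: ls) = match dTE ls with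
      | [] => if l = [] then [] else [l]
      | r => l :: r := rfl

theorem join_eq_nil_iff (L : List (List Char)) :
    PySem.Chars.join ['\n'] L = [] ↔ L = [] ∨ L = [[]] := by
  cases L with
  | nil => simp [PySem.Chars.join_nil]
  | cons l K =>
    cases K with
    | nil => simp [PySem.Chars.join_singleton]
    | cons q K' =>
      rw [PySem.Chars.join_cons_cons]
      simp

theorem dTE_ne_single_nil (K : List (List Char)) : dTE K ≠ [[]] := by
  intro hK
  cases K with
  | nil => simp [dTE] at hK
  | cons l ls =>
    simp only [dTE] at hK
    cases hr : dTE ls with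
    | nil =>
      rw [hr] at hK
      by_cases hl : l = [] <;> simp [hl] at hK
    | cons a r =>
      rw [hr] at hK
      simp at hK

theorem lstrip_join (K : List (List Char)) (h : FixedL K) :
    PySem.Chars.lstrip (PySem.Chars.join ['\n'] K) = PySem.Chars.join ['\n'] (dLE K) := by
  induction K with
  | nil => simp [PySem.Chars.join_nil, PySem.Chars.lstrip, dLE]
  | cons l K ih =>
    have hK : FixedL K := fun x hx => h x (List.mem_cons_of_mem _ hx)
    have hl := h l List.mem_cons_self
    by_cases hnil : l = []
    · subst hnil
      cases K with
      | nil => simp [PySem.Chars.join_singleton, dLE, PySem.Chars.lstrip]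
      | cons q K' =>
        rw [PySem.Chars.join_cons_cons]
        have hstep : PySem.Chars.lstrip (([] : List Char) ++ ['\n'] ++ PySem.Chars.join ['\n'] (q :: K'))
            = PySem.Chars.lstrip (PySem.Chars.join ['\n'] (q :: K')) := by
          simp [PySem.Chars.lstrip, List.dropWhile_cons,
            show PySem.Chars.isspace '\n' = true from by decide]
        rw [hstep, ih hK]
        simp [dLE]
    · cases K with
      | nil =>
        simp only [PySem.Chars.join_singleton, dLE, List.dropWhile_cons]
        simp [List.isEmpty_iff, hnil, PySem.Chars.join_singleton, hl.1]
      | cons q K' =>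
        rw [PySem.Chars.join_cons_cons, List.append_assoc,
          lstrip_append_fixed l _ hl.1 hnil]
        have hdle : dLE (l :: q :: K') = l :: q :: K' := by
          simp [dLE, List.dropWhile_cons, List.isEmpty_iff, hnil]
        rw [hdle, PySem.Chars.join_cons_cons, List.append_assoc]

theorem rstrip_join (K : List (List Char)) (h : FixedL K) :
    PySem.Chars.rstrip (PySem.Chars.join ['\n'] K) = PySem.Chars.join ['\n'] (dTE K) := by
  induction K with
  | nil => simp [PySem.Chars.join_nil, dTE]; rfl
  | cons l K ih =>
    have hK : FixedL K := fun x hx => h x (List.mem_cons_of_mem _ hx)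
    have hl := h l List.mem_cons_self
    cases K with
    | nil =>
      by_cases hnil : l = []
      · subst hnil
        simp [PySem.Chars.join_singleton, dTE, PySem.Chars.join_nil]
        rfl
      · simp [PySem.Chars.join_singleton, dTE, hnil, hl.2]
    | cons q K' =>
      rw [PySem.Chars.join_cons_cons, List.append_assoc, rstrip_append]
      have hj := ih hK
      have hn : PySem.Chars.rstrip ['\n'] = [] := by decide
      by_cases hd : dTE (q :: K') = []
      · have hjnil : PySem.Chars.rstrip (['\n'] ++ PySem.Chars.join ['\n'] (q :: K')) = [] := by
          rw [rstrip_append, hj, hd, PySem.Chars.join_nil, if_pos rfl]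
          exact hn
        rw [if_pos hjnil, dTE_cons, hd]
        by_cases hnil : l = []
        · subst hnil
          rw [if_pos rfl, PySem.Chars.join_nil]
          rfl
        · rw [if_neg hnil, PySem.Chars.join_singleton]
          exact hl.2
      · have hjne : PySem.Chars.join ['\n'] (dTE (q :: K')) ≠ [] := by
          intro hc
          rcases (join_eq_nil_iff _).mp hc with h1 | h1
          · exact hd h1
          · exact dTE_ne_single_nil _ h1
        have hrne : PySem.Chars.rstrip (['\n'] ++ PySem.Chars.join ['\n'] (q :: K')) =
            ['\n'] ++ PySem.Chars.join ['\n'] (dTE (q :: K')) := by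
          rw [rstrip_append, hj, if_neg hjne]
        rw [hrne, if_neg (by simp)]
        cases hr : dTE (q :: K') with
        | nil => exact absurd hr hd
        | cons r0 rs =>
          have hdte : dTE (l :: q :: K') = l :: r0 :: rs := by
            rw [dTE_cons, hr]
          rw [hdte, PySem.Chars.join_cons_cons, List.append_assoc]

theorem strip_join (K : List (List Char)) (h : FixedL K) :
    PySem.Chars.strip (PySem.Chars.join ['\n'] K) = PySem.Chars.join ['\n'] (dTE (dLE K)) := by
  have hdLE : FixedL (dLE K) := fun x hx => h x ((List.dropWhile_sublist _).mem hx)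
  show PySem.Chars.rstrip (PySem.Chars.lstrip (PySem.Chars.join ['\n'] K)) = _
  rw [lstrip_join K h, rstrip_join (dLE K) hdLE]

theorem collapseRuns_cons (b : Bool) (l : List Char) (ls : List (List Char)) :
    collapseRuns b (l :: ls) =
      if l = [] then (if b then collapseRuns true ls else [] :: collapseRuns true ls)
      else l :: collapseRuns false ls := rfl

theorem canonN_cons (b : Bool) (l : List Char) (ls : List (List Char)) :
    canonN b (l :: ls) =
      if l = [] then
        (if b then canonN true ls
         else match canonN true ls with
              | [] => []
              | r => [] :: r)
      else l :: canonN false ls := rfl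

-- A's fold computes collapseRuns
theorem foldl_nmtStep (lines : List (List Char)) (acc : List (List Char)) (b : Bool) :
    (lines.foldl nmtStep (acc, b)).1 = acc ++ collapseRuns b (lines.map PySem.Chars.strip) := by
  induction lines generalizing acc b with
  | nil => simp [collapseRuns]
  | cons line rest ih =>
    simp only [List.foldl_cons, List.map_cons, collapseRuns_cons]
    by_cases hs : PySem.Chars.strip line = []
    · cases b with
      | false =>
        have hstep : nmtStep (acc, false) line = (acc ++ [[]], true) := by
          simp [nmtStep, hs]
        rw [hstep, ih]
        simp [hs, List.append_assoc]
      | true =>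
        have hstep : nmtStep (acc, true) line = (acc, true) := by
          simp [nmtStep, hs]
        rw [hstep, ih]
        simp [hs]
    · have hstep : nmtStep (acc, b) line = (acc ++ [PySem.Chars.strip line], false) := by
        simp [nmtStep, hs]
      rw [hstep, ih]
      simp [hs, List.append_assoc]

-- B's zip/filter computes keepR
theorem keepR_one (l : List Char) : keepR [l] = if l = [] then [] else [l] := rfl

theorem keepR_two (l l' : List Char) (ls : List (List Char)) :
    keepR (l :: l' :: ls) = (if l = [] ∧ l' = [] then [] else [l]) ++ keepR (l' :: ls) := rfl

theorem zipfilter_eq_keepR (N : List (List Char)) :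
    (((N.zip (N.tail ++ [[]])).filter (fun p => !(p.1.isEmpty && p.2.isEmpty))).map Prod.fst)
      = keepR N := by
  induction N with
  | nil => simp [keepR]
  | cons l ls ih =>
    cases ls with
    | nil =>
      by_cases hl : l = [] <;>
        simp [keepR_one, hl, List.isEmpty_iff]
    | cons l' t =>
      simp only [List.tail_cons] at ih ⊢
      have hz : (l :: l' :: t).zip ((l' :: t) ++ [[]])
          = (l, l') :: ((l' :: t).zip (t ++ [[]])) := rfl
      rw [hz, keepR_two]
      by_cases hc : l = [] ∧ l' = []
      · rw [if_pos hc, List.nil_append, ← ih]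
        simp [hc.1, hc.2]
      · rw [if_neg hc, ← ih]
        have hcond : (!(l.isEmpty && l'.isEmpty)) = true := by
          rcases not_and_or.mp hc with h1 | h1 <;> simp [List.isEmpty_iff, h1]
        simp only [List.filter_cons, hcond, if_true, List.map_cons, List.singleton_append]

theorem dLE_collapseRuns (N : List (List Char)) (b : Bool) :
    dLE (collapseRuns b N) = collapseRuns true N := by
  induction N generalizing b with
  | nil => cases b <;> rfl
  | cons l ls ih =>
    by_cases hl : l = []
    · cases b <;>
        simp [collapseRuns_cons, hl, dLE, List.dropWhile_cons] <;>
        simpa [dLE] using ih true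
    · simp [collapseRuns_cons, hl, dLE, List.dropWhile_cons, List.isEmpty_iff]

theorem dTE_collapseRuns (N : List (List Char)) :
    dTE (collapseRuns true N) = canonN true N ∧ dTE (collapseRuns false N) = canonN false N := by
  induction N with
  | nil => constructor <;> rfl
  | cons l ls ih =>
    constructor
    · by_cases hl : l = []
      · subst hl
        simpa [collapseRuns_cons, canonN_cons] using ih.1
      · rw [show collapseRuns true (l :: ls) = l :: collapseRuns false ls by
          rw [collapseRuns_cons, if_neg hl]]
        rw [dTE_cons, ih.2, canonN_cons, if_neg hl]
        cases hr : canonN false ls <;> simp [hl]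
    · by_cases hl : l = []
      · subst hl
        rw [show collapseRuns false ([] :: ls) = [] :: collapseRuns true ls from rfl]
        rw [dTE_cons, ih.1, canonN_cons, if_pos rfl]
        cases hr : canonN true ls <;> simp
      · rw [show collapseRuns false (l :: ls) = l :: collapseRuns false ls by
          rw [collapseRuns_cons, if_neg hl]]
        rw [dTE_cons, ih.2, canonN_cons, if_neg hl]
        cases hr : canonN false ls <;> simp [hl]

theorem dLE_cons_ne (x : List Char) (K : List (List Char)) (hx : x ≠ []) :
    dLE (x :: K) = x :: K := by
  simp [dLE, List.dropWhile_cons, List.isEmpty_iff, hx]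

theorem dLE_keepR (N : List (List Char)) : dLE (keepR N) = keepR (dLE N) := by
  induction N with
  | nil => rfl
  | cons l ls ih =>
    cases ls with
    | nil =>
      by_cases hl : l = [] <;>
        simp [keepR_one, keepR, hl, dLE, List.dropWhile_cons, List.isEmpty_iff]
    | cons l' t =>
      by_cases hl : l = []
      · subst hl
        by_cases hl' : l' = []
        · subst hl'
          rw [keepR_two, if_pos ⟨rfl, rfl⟩, List.nil_append, ih]
          rfl
        · rw [keepR_two, if_neg (by simp [hl'])]
          rw [show ([[]] : List (List Char)) ++ keepR (l' :: t) = ([] : List Char) :: keepR (l' :: t) from rfl]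
          rw [show dLE (([] : List Char) :: keepR (l' :: t)) = dLE (keepR (l' :: t)) from rfl, ih]
          rw [show dLE ([] :: l' :: t) = dLE (l' :: t) from rfl]
      · rw [keepR_two]
        rw [if_neg (by simp [hl]), dLE_cons_ne _ _ hl]
        rw [show ([l] ++ keepR (l' :: t)) = l :: keepR (l' :: t) from rfl]
        rw [dLE_cons_ne _ _ hl, keepR_two, if_neg (by simp [hl])]
        rfl

theorem dTE_keepR (N : List (List Char)) : dTE (keepR N) = canonN false N := by
  induction N with
  | nil => rfl
  | cons l ls ih =>
    cases ls with
    | nil =>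
      by_cases hl : l = [] <;> simp [keepR_one, hl, dTE, canonN_cons, canonN]
    | cons l' t =>
      by_cases hl : l = []
      · subst hl
        by_cases hl' : l' = []
        · subst hl'
          rw [keepR_two, if_pos ⟨rfl, rfl⟩, List.nil_append, ih]
          rw [show canonN false ([] :: [] :: t)
              = (match canonN true t with | [] => [] | r => [] :: r) from rfl]
          rfl
        · rw [keepR_two, if_neg (by simp [hl'])]
          rw [show ([[]] : List (List Char)) ++ keepR (l' :: t) = ([] : List Char) :: keepR (l' :: t) from rfl]
          rw [dTE_cons, ih]
          rw [show canonN false (l' :: t) = l' :: canonN false t by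
            rw [canonN_cons, if_neg hl']]
          rw [show canonN false ([] :: l' :: t)
              = (match canonN true (l' :: t) with | [] => [] | r => [] :: r) from rfl]
          rw [show canonN true (l' :: t) = l' :: canonN false t by
            rw [canonN_cons, if_neg hl']]
      · rw [keepR_two, if_neg (by simp [hl])]
        rw [show ([l] ++ keepR (l' :: t)) = l :: keepR (l' :: t) from rfl]
        rw [dTE_cons, ih]
        rw [show canonN false (l :: l' :: t) = l :: canonN false (l' :: t) by
          rw [canonN_cons, if_neg hl]]
        cases hr : canonN false (l' :: t) <;> simp [hl]

theorem canonN_dLE (N : List (List Char)) : canonN true (dLE N) = canonN true N := by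
  induction N with
  | nil => rfl
  | cons l ls ih =>
    by_cases hl : l = []
    · subst hl
      rw [show dLE ([] :: ls) = dLE ls from rfl, ih]
      rfl
    · rw [show dLE (l :: ls) = l :: ls by
        simp [dLE, List.dropWhile_cons, List.isEmpty_iff, hl]]

theorem canonN_false_eq_true_of_head (N : List (List Char))
    (h : N = [] ∨ ∀ l, N.head? = some l → l ≠ []) : canonN false N = canonN true N := by
  rcases h with h | h
  · subst h; rfl
  · cases N with
    | nil => rfl
    | cons l ls =>
      have hl : l ≠ [] := h l rfl
      rw [canonN_cons, canonN_cons, if_neg hl, if_neg hl]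

theorem mem_collapseRuns (N : List (List Char)) (b : Bool) (l : List Char)
    (h : l ∈ collapseRuns b N) : l = [] ∨ l ∈ N := by
  induction N generalizing b with
  | nil => simp [collapseRuns] at h
  | cons a ls ih =>
    rw [collapseRuns_cons] at h
    by_cases ha : a = []
    · rw [if_pos ha] at h
      cases b with
      | true =>
        rw [if_pos rfl] at h
        rcases ih true h with h1 | h1
        · exact Or.inl h1
        · exact Or.inr (List.mem_cons_of_mem _ h1)
      | false =>
        rw [if_neg (by simp)] at h
        rcases List.mem_cons.mp h with h1 | h1
        · exact Or.inl h1
        · rcases ih true h1 with h2 | h2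
          · exact Or.inl h2
          · exact Or.inr (List.mem_cons_of_mem _ h2)
    · rw [if_neg ha] at h
      rcases List.mem_cons.mp h with h1 | h1
      · exact Or.inr (h1 ▸ List.mem_cons_self)
      · rcases ih false h1 with h2 | h2
        · exact Or.inl h2
        · exact Or.inr (List.mem_cons_of_mem _ h2)

theorem mem_keepR (N : List (List Char)) (l : List Char) (h : l ∈ keepR N) : l ∈ N := by
  induction N with
  | nil => simp [keepR] at h
  | cons a ls ih =>
    cases ls with
    | nil =>
      by_cases ha : a = [] <;> simp [keepR_one, ha] at h <;> simp [h]
    | cons a' t =>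
      rw [keepR_two] at h
      rcases List.mem_append.mp h with h1 | h1
      · by_cases hc : a = [] ∧ a' = []
        · rw [if_pos hc] at h1; simp at h1
        · rw [if_neg hc] at h1
          simp at h1
          exact h1 ▸ List.mem_cons_self
      · exact List.mem_cons_of_mem _ (ih h1)

theorem fixed_map_strip (M : List (List Char)) : FixedL (M.map PySem.Chars.strip) := by
  intro x hx
  rcases List.mem_map.mp hx with ⟨y, _, rfl⟩
  exact ⟨lstrip_strip y, rstrip_strip y⟩

-- the whole line-level argument, for an arbitrary split result M
theorem main_list (M : List (List Char)) :
    PySem.Chars.strip (PySem.Chars.join ['\n']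
        (((M.map PySem.Chars.rstrip).foldl nmtStep ([], false)).1))
      = PySem.Chars.strip (PySem.Chars.join ['\n']
        ((((M.map PySem.Chars.strip).zip ((M.map PySem.Chars.strip).tail ++ [[]])).filter
            (fun p => !(p.1.isEmpty && p.2.isEmpty))).map Prod.fst)) := by
  rw [foldl_nmtStep, List.nil_append, List.map_map]
  have hcomp : (M.map (PySem.Chars.strip ∘ PySem.Chars.rstrip)) = M.map PySem.Chars.strip := by
    simp only [List.map_eq_map_iff]
    intro x _
    exact strip_rstrip x
  rw [hcomp]
  have hfixN : FixedL (M.map PySem.Chars.strip) := fixed_map_strip M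
  have hfixA : FixedL (collapseRuns false (M.map PySem.Chars.strip)) := by
    intro x hx
    rcases mem_collapseRuns _ false x hx with rfl | hm
    · exact ⟨rfl, rfl⟩
    · exact hfixN x hm
  rw [zipfilter_eq_keepR]
  have hfixB : FixedL (keepR (M.map PySem.Chars.strip)) := fun x hx => hfixN x (mem_keepR _ x hx)
  rw [strip_join _ hfixA, strip_join _ hfixB]
  rw [dLE_collapseRuns, (dTE_collapseRuns _).1]
  rw [dLE_keepR, dTE_keepR]
  have hhead : ∀ (L : List (List Char)), dLE L = [] ∨ ∀ l, (dLE L).head? = some l → l ≠ [] := by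
    intro L
    induction L with
    | nil => exact Or.inl rfl
    | cons a t ih =>
      by_cases ha : a = []
      · subst ha
        exact ih
      · right
        intro l hl
        rw [show dLE (a :: t) = a :: t by
          simp [dLE, List.dropWhile_cons, List.isEmpty_iff, ha]] at hl
        simp at hl
        exact hl ▸ ha
  rw [canonN_false_eq_true_of_head _ (hhead _), canonN_dLE]

-- ===== VERDICT (by name: the statement is the Claim_ definition above) =====
theorem normalize_multiline_text_py_spec : Claim_equal_normalize_multiline_text_py := by
  intro value _
  unfold Spec_normalize_multiline_text_py normalize_multiline_text_py normalize_multiline_text_py_alt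
  exact congrArg String.ofList (main_list _)
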